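-- pv_equiv track=rewrite | github.com/1Jayakrishnan/GFG--POTD | JUNE 2024/Swapping pairs make sum equal.py | findSwapValues
-- ===== SOURCE A (Python) =====
-- def findSwapValues(a, n, b, m):
--     # Your code goes here
--     sum_a = sum(a)
--     sum_b = sum(b)
--
--     # Check if the difference is even
--     if (sum_a - sum_b) % 2 != 0:
--         return -1
--
--     delta = (sum_a - sum_b) // 2
--
--     # Create a set for fast lookups in array b
--     set_b = set(b)
--
--     # Check for each element in array a if there's a corresponding element in array b
--     for x in a:
--         y = x - delta
--         if y in set_b:
--             return 1
--
--     return -1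
-- ===== SOURCE B (Python) =====
-- def findSwapValues(a, n, b, m):
--     sum_a = sum(a)
--     sum_b = sum(b)
--     if (sum_a - sum_b) % 2 != 0:
--         return -1
--     delta = (sum_a - sum_b) // 2
--     sa = sorted(a)
--     sb = sorted(b)
--     i = 0
--     j = 0
--     while i < len(sa) and j < len(sb):
--         diff = sa[i] - sb[j]
--         if diff == delta:
--             return 1
--         elif diff < delta:
--             i += 1
--         else:
--             j += 1
--     return -1
-- ===== Notes on version B (the rewrite author's own statement) =====
-- stated objective: alternative
-- what changed: Replaces the hash-set membership scan (for each x in a, test x-delta in set(b)) by a sort-then-merge two-pointer walk over sorted copies of a and b that looks for a pair with difference delta.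
import Mathlib
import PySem

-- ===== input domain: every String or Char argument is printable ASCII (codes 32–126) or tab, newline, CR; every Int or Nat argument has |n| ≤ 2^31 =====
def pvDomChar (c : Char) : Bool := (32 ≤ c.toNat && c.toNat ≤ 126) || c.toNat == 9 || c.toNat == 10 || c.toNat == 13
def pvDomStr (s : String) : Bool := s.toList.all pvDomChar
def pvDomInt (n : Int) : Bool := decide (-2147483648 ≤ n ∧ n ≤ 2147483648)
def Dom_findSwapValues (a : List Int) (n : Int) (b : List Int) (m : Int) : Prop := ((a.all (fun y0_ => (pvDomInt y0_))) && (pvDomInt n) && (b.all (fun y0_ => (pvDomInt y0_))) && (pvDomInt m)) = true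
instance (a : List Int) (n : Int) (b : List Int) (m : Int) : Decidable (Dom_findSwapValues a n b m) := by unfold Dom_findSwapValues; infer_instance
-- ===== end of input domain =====

-- B replaces A's hash-set membership scan by a sort-then-merge two-pointer walk (alternative algorithm; return value is identical).

-- ===== PORT A =====
-- the 'for x in a: if x - delta in set_b: return 1' loop
def findSwapValuesScanA (delta : Int) (setB : PySem.Set Int) : List Int → Int
  | [] => -1
  | x :: xs => if (x - delta) ∈ setB then 1 else findSwapValuesScanA delta setB xs

def findSwapValues (a : List Int) (n : Int) (b : List Int) (m : Int) : Int :=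
  let sum_a := a.sum
  let sum_b := b.sum
  if PySem.Int.mod (sum_a - sum_b) 2 ≠ 0 then -1
  else
    let delta := PySem.Int.floordiv (sum_a - sum_b) 2
    let set_b := PySem.Set.ofList b
    findSwapValuesScanA delta set_b a

-- ===== PORT B =====
-- the two-pointer while loop over the sorted copies (advancing a pointer = dropping a head)
def findSwapValuesWalkB (delta : Int) : List Int → List Int → Int
  | x :: xs, y :: ys =>
      if x - y = delta then 1
      else if x - y < delta then findSwapValuesWalkB delta xs (y :: ys)
      else findSwapValuesWalkB delta (x :: xs) ys
  | _, _ => -1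
termination_by xs ys => xs.length + ys.length

def findSwapValues_alt (a : List Int) (n : Int) (b : List Int) (m : Int) : Int :=
  let sum_a := a.sum
  let sum_b := b.sum
  if PySem.Int.mod (sum_a - sum_b) 2 ≠ 0 then -1
  else
    let delta := PySem.Int.floordiv (sum_a - sum_b) 2
    let sa := PySem.List.sorted a (fun x => x) false
    let sb := PySem.List.sorted b (fun x => x) false
    findSwapValuesWalkB delta sa sb

-- ===== PRECONDITION & SPEC =====
def Spec_findSwapValues (a : List Int) (n : Int) (b : List Int) (m : Int) (out : Int) : Prop := out = findSwapValues_alt a n b m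
instance (a : List Int) (n : Int) (b : List Int) (m : Int) (out : Int) : Decidable (Spec_findSwapValues a n b m out) := by unfold Spec_findSwapValues; infer_instance

-- ===== CLAIM (what is proved, stated in full; the proofs are below) =====
def Claim_equal_findSwapValues : Prop := ∀ (a : List Int) (n : Int) (b : List Int) (m : Int), Dom_findSwapValues a n b m → Spec_findSwapValues a n b m (findSwapValues a n b m)

-- ===== LEMMAS AND PROOFS =====

-- A's scan returns 1 exactly when some x ∈ a has x - delta in the set
theorem findSwapValuesScanA_eq (delta : Int) (setB : PySem.Set Int) (xs : List Int) :
    findSwapValuesScanA delta setB xs = if ∃ x ∈ xs, (x - delta) ∈ setB then 1 else -1 := by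
  induction xs with
  | nil => simp [findSwapValuesScanA]
  | cons x xs ih =>
    simp only [findSwapValuesScanA, ih]
    by_cases h : (x - delta) ∈ setB <;> simp [h]

-- B's two-pointer walk on sorted lists returns 1 exactly when some pair differs by delta
theorem findSwapValuesWalkB_eq (delta : Int) (xs ys : List Int) :
    xs.Pairwise (· ≤ ·) → ys.Pairwise (· ≤ ·) →
    findSwapValuesWalkB delta xs ys = if ∃ x ∈ xs, ∃ y ∈ ys, x - y = delta then 1 else -1 := by
  induction xs, ys using findSwapValuesWalkB.induct delta with
  | case1 x xs y ys heq =>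
    intro _ _
    rw [if_pos ⟨x, by simp, y, by simp, heq⟩]
    simp [findSwapValuesWalkB, heq]
  | case2 x xs y ys hne hlt ih =>
    intro hx hy
    simp only [findSwapValuesWalkB, if_neg hne, if_pos hlt]
    rw [ih (List.Pairwise.sublist (List.sublist_cons_self x xs) hx) hy]
    congr 1
    simp only [eq_iff_iff, List.mem_cons]
    constructor
    · rintro ⟨x', hx', hy'⟩; exact ⟨x', Or.inr hx', hy'⟩
    · rintro ⟨x', hx' | hx', y', hy', hxy⟩
      · -- x' = x cannot pair: every y' ≥ y, so x - y' ≤ x - y < delta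
        exfalso
        have hyle : y ≤ y' := by
          rcases hy' with h | h
          · omega
          · exact (List.pairwise_cons.mp hy).1 y' h
        omega
      · exact ⟨x', hx', y', hy', hxy⟩
  | case3 x xs y ys hne hnlt ih =>
    intro hx hy
    simp only [findSwapValuesWalkB, if_neg hne, if_neg hnlt]
    rw [ih hx (List.Pairwise.sublist (List.sublist_cons_self y ys) hy)]
    congr 1
    simp only [eq_iff_iff, List.mem_cons]
    constructor
    · rintro ⟨x', hx', y', hy', hxy⟩; exact ⟨x', hx', y', Or.inr hy', hxy⟩
    · rintro ⟨x', hx', y', hy' | hy', hxy⟩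
      · -- y' = y cannot pair: every x' ≥ x, so x' - y ≥ x - y > delta
        exfalso
        have hxle : x ≤ x' := by
          rcases hx' with h | h
          · omega
          · exact (List.pairwise_cons.mp hx).1 x' h
        omega
      · exact ⟨x', hx', y', hy', hxy⟩
  | case4 xs ys hne =>
    intro _ _
    match xs, ys with
    | [], ys => simp [findSwapValuesWalkB]
    | x :: xs, [] => simp [findSwapValuesWalkB]
    | x :: xs, y :: ys => exact absurd rfl (fun h => hne x xs y ys h rfl)

-- ===== VERDICT (by name: the statement is the Claim_ definition above) =====
theorem findSwapValues_spec : Claim_equal_findSwapValues := by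
  intro a n b m _
  unfold Spec_findSwapValues findSwapValues findSwapValues_alt
  by_cases hpar : PySem.Int.mod (a.sum - b.sum) 2 ≠ 0
  · simp only [if_pos hpar]
  · simp only [if_neg hpar]
    rw [findSwapValuesScanA_eq,
      findSwapValuesWalkB_eq _ _ _
        (by simpa using PySem.List.sorted_pairwise (xs := a) (key := fun x => x))
        (by simpa using PySem.List.sorted_pairwise (xs := b) (key := fun x => x))]
    congr 1
    simp only [eq_iff_iff, PySem.Set.mem_ofList, PySem.List.mem_sorted]
    constructor
    · rintro ⟨x, hx, hy⟩
      exact ⟨x, hx, x - PySem.Int.floordiv (a.sum - b.sum) 2, hy, by ring⟩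
    · rintro ⟨x, hx, y, hy, hxy⟩
      exact ⟨x, hx, by rwa [show x - PySem.Int.floordiv (a.sum - b.sum) 2 = y by omega]⟩
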